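-- pv_equiv track=rewrite | github.com/Ashay041/menova-ai-backend-frontend | rag/symspell.py | _generate_deletes
-- ===== SOURCE A (Python) =====
-- from typing import Set, Dict, List, Tuple, Optional
--
-- def _generate_deletes(word: str, max_edit_distance: int) -> Set[str]:
--     """
--     Generate all deletion variants of a word with up to max_edit_distance deletions.
--
--     :param word: The input word.
--     :param max_edit_distance: Maximum number of deletions allowed.
--     :return: A set of deletion variants.
--     """
--     deletes: Set[str] = set()
--
--     def helper(current_word: str, distance: int) -> None:
--         if distance == 0:
--             return
--         for i in range(len(current_word)):
--             deletion = current_word[:i] + current_word[i+1:]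
--             if deletion not in deletes:
--                 deletes.add(deletion)
--                 helper(deletion, distance - 1)
--
--     helper(word, max_edit_distance)
--     return deletes
-- ===== SOURCE B (Python) =====
-- def _generate_deletes(word: str, max_edit_distance: int):
--     """Iterative deletion-variant generation: explicit work stack instead of recursion."""
--     deletes = set()
--     stack = [(word, 0, max_edit_distance)]
--     while stack:
--         cur, i, dist = stack.pop()
--         if dist == 0 or i >= len(cur):
--             continue
--         deletion = cur[:i] + cur[i + 1:]
--         stack.append((cur, i + 1, dist))
--         if deletion not in deletes:
--             deletes.add(deletion)
--             stack.append((deletion, 0, dist - 1))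
--     return deletes
-- ===== Notes on version B (the rewrite author's own statement) =====
-- stated objective: alternative
-- what changed: Replaces A's recursive DFS helper (closure mutating a shared set) with an iterative loop over an explicit work stack of (word, next-index, remaining-distance) frames; no recursion, so no recursion-depth limit.
import Mathlib
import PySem

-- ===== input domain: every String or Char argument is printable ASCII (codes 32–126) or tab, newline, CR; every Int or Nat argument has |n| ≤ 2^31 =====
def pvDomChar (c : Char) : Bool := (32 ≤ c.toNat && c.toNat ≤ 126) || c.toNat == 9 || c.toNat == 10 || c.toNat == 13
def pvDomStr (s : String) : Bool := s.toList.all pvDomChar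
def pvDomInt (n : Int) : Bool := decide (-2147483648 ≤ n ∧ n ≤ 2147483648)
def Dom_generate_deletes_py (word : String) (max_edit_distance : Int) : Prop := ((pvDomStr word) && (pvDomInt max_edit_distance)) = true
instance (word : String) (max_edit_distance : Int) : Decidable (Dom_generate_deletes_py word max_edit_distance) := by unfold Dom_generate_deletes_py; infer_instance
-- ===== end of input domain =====

-- B replaces A's recursive DFS helper by an iterative loop over an explicit work stack
-- (same traversal; objective: alternative decomposition, no speed claim).

-- shared one-liner: the Python expression  cur[:i] + cur[i+1:]  (both programs contain it verbatim)
def pvDel (cs : List Char) (i : Nat) : List Char :=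
  PySem.List.slice cs none (some (i : Int)) ++ PySem.List.slice cs (some ((i : Int) + 1)) none

-- needed by the ports' termination proofs
theorem pvDel_length (cs : List Char) (i : Nat) (h : i < cs.length) :
    (pvDel cs i).length = cs.length - 1 := by
  have h1 : ((i : Int) + 1) = ((i + 1 : Nat) : Int) := by push_cast; ring
  unfold pvDel
  rw [h1, PySem.List.slice_to_natCast, PySem.List.slice_from_natCast]
  simp; omega

-- ===== PORT A =====
-- recursive DFS: helper(current_word, distance), the for-loop transcribed as index recursion
mutual
def pvHelperA (cur : List Char) (dist : Int) (deletes : PySem.Set (List Char)) :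
    PySem.Set (List Char) :=
  if dist == 0 then deletes
  else pvLoopA cur dist 0 deletes
termination_by (cur.length, cur.length + 2)
decreasing_by
  exact Prod.Lex.right _ (by omega)

def pvLoopA (cur : List Char) (dist : Int) (i : Nat) (deletes : PySem.Set (List Char)) :
    PySem.Set (List Char) :=
  if h : i < cur.length then
    let deletion := pvDel cur i
    if PySem.Set.contains deletes deletion then
      pvLoopA cur dist (i + 1) deletes
    else
      pvLoopA cur dist (i + 1) (pvHelperA deletion (dist - 1) (PySem.Set.add deletes deletion))
  else deletes
termination_by (cur.length, cur.length + 1 - i)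
decreasing_by
  · exact Prod.Lex.right _ (by omega)
  · exact Prod.Lex.left _ _ (by rw [pvDel_length cur i h]; omega)
  · exact Prod.Lex.right _ (by omega)
end

def generate_deletes_py (word : String) (max_edit_distance : Int) : List String :=
  (pvHelperA word.toList max_edit_distance PySem.Set.empty).map String.ofList

-- ===== PORT B =====
-- cost of one stack entry; the sum over the stack is B's termination measure
def pvCost (e : List Char × Nat × Int) : Nat :=
  (e.1.length + 1 - e.2.1) * (e.1.length + 2).factorial + 1

-- needed by pvStepB's termination proof (the case that pushes a child entry)
theorem pvCost_key (L i : Nat) (h : i < L) :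
    (L - 1 + 1 - 0) * (L - 1 + 2).factorial + 1 + ((L + 1 - (i + 1)) * (L + 2).factorial + 1)
      < (L + 1 - i) * (L + 2).factorial + 1 := by
  obtain ⟨j, rfl⟩ : ∃ j, L = i + j + 1 := ⟨L - i - 1, by omega⟩
  have e1 : i + j + 1 - 1 + 1 - 0 = i + j + 1 := by omega
  have e2 : i + j + 1 - 1 + 2 = i + j + 2 := by omega
  have e3 : i + j + 1 + 1 - (i + 1) = j + 1 := by omega
  have e4 : i + j + 1 + 1 - i = j + 2 := by omega
  rw [e1, e2, e3, e4]
  have hf : (i + j + 1 + 2).factorial = (i + j + 3) * (i + j + 2).factorial := by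
    have : i + j + 1 + 2 = (i + j + 2) + 1 := by omega
    rw [this, Nat.factorial_succ]
  rw [hf]
  have hfp : 1 ≤ (i + j + 2).factorial := Nat.one_le_iff_ne_zero.mpr (Nat.factorial_ne_zero _)
  nlinarith

-- iterative DFS over an explicit work stack (head of the list = top of the Python stack)
def pvStepB (stack : List (List Char × Nat × Int)) (deletes : PySem.Set (List Char)) :
    PySem.Set (List Char) :=
  match stack with
  | [] => deletes
  | (cur, i, dist) :: rest =>
    if dist == 0 || decide (cur.length ≤ i) then pvStepB rest deletes
    else
      let deletion := pvDel cur i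
      if PySem.Set.contains deletes deletion then
        pvStepB ((cur, i + 1, dist) :: rest) deletes
      else
        pvStepB ((deletion, 0, dist - 1) :: (cur, i + 1, dist) :: rest)
          (PySem.Set.add deletes deletion)
termination_by (stack.map pvCost).sum
decreasing_by
  · simp [pvCost]
  · rename_i hg _
    simp only [Bool.or_eq_true, beq_iff_eq, decide_eq_true_eq, not_or] at hg
    simp only [List.map_cons, List.sum_cons, pvCost]
    have : (cur.length + 1 - (i + 1)) * (cur.length + 2).factorial
         < (cur.length + 1 - i) * (cur.length + 2).factorial :=
      Nat.mul_lt_mul_of_lt_of_le (by omega) (le_refl _) (Nat.factorial_pos _)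
    omega
  · rename_i hg _
    simp only [Bool.or_eq_true, beq_iff_eq, decide_eq_true_eq, not_or] at hg
    have hi : i < cur.length := by omega
    have key := pvCost_key cur.length i hi
    simp only [List.map_cons, List.sum_cons, pvCost, pvDel_length cur i hi]
    omega

def generate_deletes_py_alt (word : String) (max_edit_distance : Int) : List String :=
  (pvStepB [(word.toList, 0, max_edit_distance)] PySem.Set.empty).map String.ofList

-- ===== PRECONDITION & SPEC =====
def Spec_generate_deletes_py (word : String) (max_edit_distance : Int) (out : List String) : Prop := out = generate_deletes_py_alt word max_edit_distance
instance (word : String) (max_edit_distance : Int) (out : List String) : Decidable (Spec_generate_deletes_py word max_edit_distance out) := by unfold Spec_generate_deletes_py; infer_instance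

-- ===== CLAIM (what is proved, stated in full; the proofs are below) =====
def Claim_equal_generate_deletes_py : Prop := ∀ (word : String) (max_edit_distance : Int), Dom_generate_deletes_py word max_edit_distance → Spec_generate_deletes_py word max_edit_distance (generate_deletes_py word max_edit_distance)

-- ===== LEMMAS AND PROOFS =====

-- popping one loop entry of B simulates one round of A's for-loop (inner induction on the
-- remaining loop length k; IH handles B's child entries via A's recursive helper calls)
theorem pvSimL (n : Nat)
    (IH : ∀ (cur' : List Char), cur'.length < n → ∀ (dist : Int) rest deletes,
      pvStepB ((cur', 0, dist) :: rest) deletes = pvStepB rest (pvHelperA cur' dist deletes)) :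
    ∀ (k : Nat) (cur : List Char) (i : Nat) (dist : Int) rest deletes,
      cur.length = n → n - i ≤ k → dist ≠ 0 →
      pvStepB ((cur, i, dist) :: rest) deletes = pvStepB rest (pvLoopA cur dist i deletes) := by
  intro k
  induction k with
  | zero =>
    intro cur i dist rest deletes hn hk hd
    have hi : ¬ i < cur.length := by omega
    rw [pvStepB.eq_def, pvLoopA.eq_def]
    simp [hi, Nat.le_of_not_lt hi]
  | succ k ihk =>
    intro cur i dist rest deletes hn hk hd
    by_cases hi : i < cur.length
    · have hguard : ¬((dist == 0 || decide (cur.length ≤ i)) = true) := by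
        simp [hd]; omega
      rw [pvStepB.eq_def, pvLoopA.eq_def]
      simp only [if_neg hguard, dif_pos hi]
      by_cases hmem : PySem.Set.contains deletes (pvDel cur i) = true
      · rw [if_pos hmem, if_pos hmem]
        exact ihk cur (i + 1) dist rest deletes hn (by omega) hd
      · rw [if_neg hmem, if_neg hmem]
        rw [IH (pvDel cur i) (by rw [pvDel_length cur i hi]; omega)]
        exact ihk cur (i + 1) dist rest _ hn (by omega) hd
    · rw [pvStepB.eq_def, pvLoopA.eq_def]
      simp [hi, Nat.le_of_not_lt hi]

-- popping a fresh entry (cur, 0, dist) of B computes A's helper(cur, dist)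
theorem pvSimH : ∀ (n : Nat) (cur : List Char), cur.length = n → ∀ (dist : Int) rest deletes,
    pvStepB ((cur, 0, dist) :: rest) deletes = pvStepB rest (pvHelperA cur dist deletes) := by
  intro n
  induction n using Nat.strong_induction_on with
  | _ n IHn =>
    intro cur hn dist rest deletes
    by_cases hd : dist = 0
    · rw [pvStepB.eq_def, pvHelperA.eq_def]
      simp [hd]
    · rw [pvHelperA.eq_def]
      simp only [beq_iff_eq, if_neg hd]
      exact pvSimL n (fun cur' h => IHn cur'.length (hn ▸ h) cur' rfl) n cur 0 dist rest deletes
        hn (by omega) hd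

-- ===== VERDICT (by name: the statement is the Claim_ definition above) =====
theorem generate_deletes_py_spec : Claim_equal_generate_deletes_py := by
  intro word med _hdom
  unfold Spec_generate_deletes_py generate_deletes_py generate_deletes_py_alt
  rw [pvSimH word.toList.length word.toList rfl med [] PySem.Set.empty, pvStepB.eq_def]
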